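-- pv_equiv track=rewrite | github.com/RealTimeWeb/datasets | builder/languages/build_java.py | parse_json_path_all
-- ===== SOURCE A (Python) =====
-- def parse_json_path_all(path, result="raw"):
--     elements = []
--     for keys in path.split("."):
--         while keys:
--             left, sep, keys = keys.partition("[")
--             val, sep, keys = keys.partition("]")
--             if left:
--                 elements.append('"{}"'.format(left))
--             if val:
--                 elements.append(int(val))
--     if elements:
--         for item in elements:
--             if isinstance(item, str):
--                 result = '((JSONObject) {}).get({})'.format(result, item)
--             else:
--                 result = '((JSONArray {}).get({})'.format(result, item)
--     return result
-- ===== SOURCE B (Python) =====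
-- def parse_json_path_all(path, result="raw"):
--     # Single character-level scan: no split/partition, no intermediate list.
--     buf = ""
--     inside = False  # inside a '[...' bracket?
--     for ch in path:
--         if inside:
--             if ch == "]" or ch == ".":
--                 if buf:
--                     result = '((JSONArray {}).get({})'.format(result, int(buf))
--                 buf = ""
--                 inside = False
--             else:
--                 buf += ch
--         else:
--             if ch == "[" or ch == ".":
--                 if buf:
--                     result = '((JSONObject) {}).get("{}")'.format(result, buf)
--                 buf = ""
--                 inside = (ch == "[")
--             else:
--                 buf += ch
--     if buf:
--         if inside:
--             result = '((JSONArray {}).get({})'.format(result, int(buf))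
--         else:
--             result = '((JSONObject) {}).get("{}")'.format(result, buf)
--     return result
-- ===== Notes on version B (the rewrite author's own statement) =====
-- stated objective: alternative
-- what changed: A works in two phases: it splits the path on dots, repeatedly partitions each segment at the opening and closing bracket characters into an intermediate elements list, and then folds the two format strings over that list; B is a single character-level state-machine scan (inside/outside a bracket, one buffer) with no split, no partition and no intermediate list, wrapping the result string on the fly.
import Mathlib
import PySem

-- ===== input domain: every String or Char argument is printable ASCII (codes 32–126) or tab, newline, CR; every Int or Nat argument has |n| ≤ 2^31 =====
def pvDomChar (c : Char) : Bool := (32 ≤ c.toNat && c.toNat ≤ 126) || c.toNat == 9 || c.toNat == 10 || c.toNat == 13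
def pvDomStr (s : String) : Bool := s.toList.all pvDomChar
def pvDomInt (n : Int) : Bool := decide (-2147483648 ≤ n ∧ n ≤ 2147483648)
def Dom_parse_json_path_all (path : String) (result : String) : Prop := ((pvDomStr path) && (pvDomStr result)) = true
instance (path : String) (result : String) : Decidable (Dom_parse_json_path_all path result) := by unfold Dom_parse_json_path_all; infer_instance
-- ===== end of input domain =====

-- B replaces A's split/partition two-phase construction by a single character-level scan
-- (state machine) that formats the result on the fly; alternative decomposition, not faster.


-- ===== PORT A =====

-- s.partition(sep) for a single-char sep, on char lists: (part before sep, part after sep);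
-- (cs, []) when sep is absent — exactly Python's partition restricted to the two fields A uses.
def pvPart (sep : Char) : List Char → List Char × List Char
  | [] => ([], [])
  | c :: cs =>
    if c = sep then ([], cs)
    else
      let p := pvPart sep cs
      (c :: p.1, p.2)

theorem pvPart_snd_le (sep : Char) (cs : List Char) : (pvPart sep cs).2.length ≤ cs.length := by
  induction cs with
  | nil => simp [pvPart]
  | cons c cs ih =>
    simp only [pvPart]
    split <;> simp <;> omega

theorem pvPart_snd_lt (sep : Char) (cs : List Char) (h : cs ≠ []) :
    (pvPart sep cs).2.length < cs.length := by
  cases cs with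
  | nil => exact absurd rfl h
  | cons c cs =>
    simp only [pvPart]
    split
    · simp
    · have := pvPart_snd_le sep cs
      simp
      omega

-- A's inner `while keys:` loop over one '.'-segment, building `elements`
-- (Sum.inl = the quoted string element, Sum.inr = the parsed int element);
-- none = Python raises ValueError in int(val).
def aSeg (keys : List Char) (elems : List (Sum (List Char) Int)) :
    Option (List (Sum (List Char) Int)) :=
  if hk : keys = [] then some elems
  else
    let p1 := pvPart '[' keys
    let p2 := pvPart ']' p1.2
    let e1 := if p1.1 = [] then elems else elems ++ [Sum.inl ('"' :: p1.1 ++ ['"'])]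
    match (if p2.1 = [] then some e1 else (PySem.Int.ofChars? p2.1).map (fun n => e1 ++ [Sum.inr n])) with
    | none => none
    | some e2 => aSeg p2.2 e2
termination_by keys.length
decreasing_by
  exact lt_of_le_of_lt (pvPart_snd_le ']' _) (pvPart_snd_lt '[' keys hk)

-- the outer `for keys in path.split(".")` loop
def aElems : List (List Char) → List (Sum (List Char) Int) → Option (List (Sum (List Char) Int))
  | [], elems => some elems
  | s :: rest, elems =>
    match aSeg s elems with
    | none => none
    | some e => aElems rest e

-- the second phase: result = '((JSONObject) {}).get({})' / '((JSONArray {}).get({})'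
def aFmt (res : List Char) (item : Sum (List Char) Int) : List Char :=
  match item with
  | Sum.inl s =>
      ['(','(','J','S','O','N','O','b','j','e','c','t',')',' '] ++ res
        ++ [')','.','g','e','t','('] ++ s ++ [')']
  | Sum.inr n =>
      ['(','(','J','S','O','N','A','r','r','a','y',' '] ++ res
        ++ [')','.','g','e','t','('] ++ PySem.Int.toChars n ++ [')']

def parse_json_path_all (path : String) (result : String) : String :=
  match aElems (PySem.Chars.splitOn path.toList ['.']) [] with
  | none => result  -- Python raises ValueError here; such inputs are excluded by Pre_
  | some elems => if elems = [] then result else String.ofList (elems.foldl aFmt result.toList)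

-- ===== PORT B =====

def bObj (res buf : List Char) : List Char :=
  ['(','(','J','S','O','N','O','b','j','e','c','t',')',' '] ++ res
    ++ [')','.','g','e','t','(','"'] ++ buf ++ ['"',')']

def bArr (res : List Char) (n : Int) : List Char :=
  ['(','(','J','S','O','N','A','r','r','a','y',' '] ++ res
    ++ [')','.','g','e','t','('] ++ PySem.Int.toChars n ++ [')']

-- flush the buffer when inside a bracket: int(buf) then the JSONArray wrap (none = ValueError)
def bFlushIn (res buf : List Char) : Option (List Char) :=
  if buf = [] then some res else (PySem.Int.ofChars? buf).map (bArr res)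

-- flush the buffer when outside brackets: the JSONObject wrap
def bFlushOut (res buf : List Char) : List Char :=
  if buf = [] then res else bObj res buf

-- the single for-ch-in-path scan of B, state = (inside, buf, result)
def bGo : List Char → Bool → List Char → List Char → Option (List Char)
  | [], inside, buf, res => if inside then bFlushIn res buf else some (bFlushOut res buf)
  | c :: rest, inside, buf, res =>
    if inside then
      if c = ']' ∨ c = '.' then
        match bFlushIn res buf with
        | none => none
        | some r => bGo rest false [] r
      else bGo rest true (buf ++ [c]) res
    else
      if c = '[' ∨ c = '.' then bGo rest (c = '[') [] (bFlushOut res buf)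
      else bGo rest false (buf ++ [c]) res

def parse_json_path_all_alt (path : String) (result : String) : String :=
  match bGo path.toList false [] result.toList with
  | none => ""  -- Python raises ValueError here; such inputs are excluded by Pre_
  | some r => String.ofList r

-- ===== PRECONDITION & SPEC =====

-- the bracket tokens of the path: the maximal runs of characters following a '[' up to the
-- next ']' or '.' or the end of the string (a plain text scan, independent of both ports)
def pvVals : List Char → Bool → List Char → List (List Char)
  | [], inside, buf => if inside ∧ buf ≠ [] then [buf] else []
  | c :: rest, inside, buf =>
    if inside then
      if c = ']' ∨ c = '.' then (if buf = [] then [] else [buf]) ++ pvVals rest false []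
      else pvVals rest true (buf ++ [c])
    else pvVals rest (c = '[') []

-- Pre_ excludes exactly the inputs on which Python A raises ValueError in int(val):
-- paths with a bracket token that is not an integer literal.
def Pre_parse_json_path_all (path : String) (result : String) : Prop :=
  ∀ v ∈ pvVals path.toList false [], (PySem.Int.ofChars? v).isSome = true

instance (path : String) (result : String) : Decidable (Pre_parse_json_path_all path result) := by
  unfold Pre_parse_json_path_all; infer_instance

def pvWitness_parse_json_path_all : String × String := ("a[0].b", "raw")

def Spec_parse_json_path_all (path : String) (result : String) (out : String) : Prop :=
  out = parse_json_path_all_alt path result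
instance (path : String) (result : String) (out : String) :
    Decidable (Spec_parse_json_path_all path result out) := by
  unfold Spec_parse_json_path_all; infer_instance

-- ===== CLAIM (what is proved, stated in full; the proofs are below) =====
def Claim_equal_parse_json_path_all : Prop := ∀ (path : String) (result : String), Dom_parse_json_path_all path result → Pre_parse_json_path_all path result → Spec_parse_json_path_all path result (parse_json_path_all path result)

-- ===== LEMMAS AND PROOFS =====

-- canonical token list of the scan: inl = a name token, inr = a (raw) bracket token
def toks : List Char → Bool → List Char → List (Sum (List Char) (List Char))
  | [], inside, buf => if buf = [] then [] else [if inside then Sum.inr buf else Sum.inl buf]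
  | c :: rest, inside, buf =>
    if inside then
      if c = ']' ∨ c = '.' then (if buf = [] then [] else [Sum.inr buf]) ++ toks rest false []
      else toks rest true (buf ++ [c])
    else
      if c = '[' ∨ c = '.' then (if buf = [] then [] else [Sum.inl buf]) ++ toks rest (c = '[') []
      else toks rest false (buf ++ [c])

-- folding the formatters over a token list (B's order of work)
def appT : List (Sum (List Char) (List Char)) → List Char → Option (List Char)
  | [], res => some res
  | Sum.inl l :: ts, res => appT ts (bObj res l)
  | Sum.inr v :: ts, res =>
    match PySem.Int.ofChars? v with
    | none => none
    | some n => appT ts (bArr res n)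

-- turning a token list into A's `elements` list
def elemsOf : List (Sum (List Char) (List Char)) → Option (List (Sum (List Char) Int))
  | [] => some []
  | Sum.inl l :: ts => (elemsOf ts).map (fun es => Sum.inl ('"' :: l ++ ['"']) :: es)
  | Sum.inr v :: ts =>
    match PySem.Int.ofChars? v with
    | none => none
    | some n => (elemsOf ts).map (fun es => Sum.inr n :: es)

-- structural form of split on a single-char separator
def mySplit (sep : Char) (l : List Char) : List (List Char) :=
  if h : sep ∈ l then (pvPart sep l).1 :: mySplit sep (pvPart sep l).2 else [(pvPart sep l).1]
termination_by l.length
decreasing_by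
  exact pvPart_snd_lt sep l (by rintro rfl; simp at h)

theorem pvPart_not_mem {sep : Char} {cs : List Char} (h : sep ∉ cs) : pvPart sep cs = (cs, []) := by
  induction cs with
  | nil => rfl
  | cons c cs ih =>
    simp only [List.mem_cons, not_or] at h
    simp only [pvPart, if_neg (fun hc : c = sep => h.1 hc.symm), ih h.2]

theorem pvPart_mem_snd {sep x : Char} {cs : List Char} (h : x ∈ (pvPart sep cs).2) : x ∈ cs := by
  induction cs with
  | nil => simp [pvPart] at h
  | cons c cs ih =>
    simp only [pvPart] at h
    split at h
    · exact List.mem_cons_of_mem _ h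
    · exact List.mem_cons_of_mem _ (ih h)

-- PySem.Chars.splitOn on a one-char separator is mySplit
-- cs = first segment ++ sep ++ rest, when sep occurs
theorem pvPart_decomp {sep : Char} {cs : List Char} (h : sep ∈ cs) :
    cs = (pvPart sep cs).1 ++ sep :: (pvPart sep cs).2 := by
  induction cs with
  | nil => simp at h
  | cons c cs ih =>
    by_cases hc : c = sep
    · subst hc; simp [pvPart]
    · have hm : sep ∈ cs := by
        rcases List.mem_cons.mp h with h1 | h1
        · exact absurd h1.symm hc
        · exact h1
      simp only [pvPart, if_neg hc]
      exact congrArg (c :: ·) (ih hm)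

theorem pvPart_fst_not_mem (sep : Char) (cs : List Char) : sep ∉ (pvPart sep cs).1 := by
  induction cs with
  | nil => simp [pvPart]
  | cons c cs ih =>
    simp only [pvPart]
    split
    · simp
    · rename_i hc
      simp only [List.mem_cons, not_or]
      exact ⟨fun hs => hc hs.symm, ih⟩

theorem mySplit_eq (sep : Char) (l : List Char) :
    mySplit sep l = (pvPart sep l).1 ::
      (if sep ∈ l then mySplit sep (pvPart sep l).2 else []) := by
  rw [mySplit]
  split <;> simp_all

-- prepend to the head segment
def consH (pre : List Char) : List (List Char) → List (List Char)
  | [] => []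
  | h :: t => (pre ++ h) :: t

theorem consH_nil_mySplit (sep : Char) (l : List Char) :
    consH [] (mySplit sep l) = mySplit sep l := by
  rw [mySplit_eq]; simp [consH]

theorem go_eq (sep : Char) (fuel : Nat) :
    ∀ (l cur : List Char) (acc : List (List Char)), l.length < fuel →
      PySem.Chars.splitOn.go [sep] fuel l cur acc
        = acc.reverse ++ consH cur.reverse (mySplit sep l) := by
  induction fuel with
  | zero => intro l cur acc h; omega
  | succ f ih =>
    intro l cur acc h
    cases l with
    | nil =>
      simp [PySem.Chars.splitOn.go, mySplit_eq, pvPart, consH]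
    | cons c rest =>
      by_cases hc : c = sep
      · subst hc
        have hpre : List.isPrefixOf [c] (c :: rest) = true := by simp [List.isPrefixOf]
        simp only [PySem.Chars.splitOn.go, hpre, if_pos]
        rw [List.length_cons] at h
        have hrec := ih rest [] (cur.reverse :: acc) (by omega)
        simp only [List.length_singleton, List.drop_one, List.tail_cons]
        rw [hrec, List.reverse_nil, consH_nil_mySplit]
        rw [mySplit_eq c (c :: rest)]
        simp [pvPart, consH]
      · have hpre : List.isPrefixOf [sep] (c :: rest) = false := by
          simp [List.isPrefixOf]
          exact fun hs => absurd hs.symm hc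
        simp only [PySem.Chars.splitOn.go, hpre, Bool.false_eq_true, if_false]
        rw [List.length_cons] at h
        rw [ih rest (c :: cur) acc (by omega)]
        have hmem : (sep ∈ c :: rest) ↔ sep ∈ rest := by
          rw [List.mem_cons]
          exact or_iff_right (fun hs => hc hs.symm)
        rw [mySplit_eq sep (c :: rest), mySplit_eq sep rest]
        simp only [pvPart, if_neg hc, hmem, List.reverse_cons]
        simp [consH, List.append_assoc]

theorem splitOn_eq_mySplit (sep : Char) (cs : List Char) :
    PySem.Chars.splitOn cs [sep] = mySplit sep cs := by
  show PySem.Chars.splitOn.go [sep] (cs.length + 1) cs [] [] = _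
  rw [go_eq sep (cs.length + 1) cs [] [] (by omega)]
  rw [mySplit_eq]
  simp [consH]

-- the scan of a dot-free string, outside state, is: flush through the first '[' then go inside
theorem toks_out (cs : List Char) (h : '.' ∉ cs) (buf : List Char) :
    toks cs false buf =
      (if buf ++ (pvPart '[' cs).1 = [] then [] else [Sum.inl (buf ++ (pvPart '[' cs).1)])
        ++ toks (pvPart '[' cs).2 true [] := by
  induction cs generalizing buf with
  | nil => simp [toks, pvPart]
  | cons c rest ih =>
    simp only [List.mem_cons, not_or] at h
    by_cases hc : c = '['
    · subst hc
      simp [toks, pvPart]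
    · have hcond : ¬ (c = '[' ∨ c = '.') := by
        rintro (h1 | h1)
        · exact hc h1
        · exact h.1 h1.symm
      simp only [toks, hcond, if_false]
      rw [ih h.2 (buf ++ [c])]
      simp [pvPart, if_neg hc, List.append_assoc]

theorem toks_in (cs : List Char) (h : '.' ∉ cs) (buf : List Char) :
    toks cs true buf =
      (if buf ++ (pvPart ']' cs).1 = [] then [] else [Sum.inr (buf ++ (pvPart ']' cs).1)])
        ++ toks (pvPart ']' cs).2 false [] := by
  induction cs generalizing buf with
  | nil => simp [toks, pvPart]
  | cons c rest ih =>
    simp only [List.mem_cons, not_or] at h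
    by_cases hc : c = ']'
    · subst hc
      simp [toks, pvPart]
    · have hcond : ¬ (c = ']' ∨ c = '.') := by
        rintro (h1 | h1)
        · exact hc h1
        · exact h.1 h1.symm
      simp only [toks, hcond, if_false]
      rw [ih h.2 (buf ++ [c])]
      simp [pvPart, if_neg hc, List.append_assoc]

-- the scan cuts at a '.' exactly like A's outer split
theorem toks_dot (s1 r : List Char) (inside : Bool) (buf : List Char) (h : '.' ∉ s1) :
    toks (s1 ++ '.' :: r) inside buf = toks s1 inside buf ++ toks r false [] := by
  induction s1 generalizing inside buf with
  | nil =>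
    cases inside <;> simp [toks]
  | cons c s1 ih =>
    simp only [List.mem_cons, not_or] at h
    have hcd : ¬ c = '.' := fun hd => h.1 hd.symm
    cases inside with
    | true =>
      by_cases hc : c = ']'
      · subst hc
        simp only [List.cons_append, toks]
        simp [ih false [] h.2]
      · have hcond : ¬ (c = ']' ∨ c = '.') := by
          rintro (h1 | h1)
          · exact hc h1
          · exact hcd h1
        simp only [List.cons_append, toks]
        simp [hcond, ih true (buf ++ [c]) h.2]
    | false =>
      by_cases hc : c = '['
      · subst hc
        simp only [List.cons_append, toks]
        simp [ih true [] h.2]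
      · have hcond : ¬ (c = '[' ∨ c = '.') := by
          rintro (h1 | h1)
          · exact hc h1
          · exact hcd h1
        simp only [List.cons_append, toks]
        simp [hcond, ih false (buf ++ [c]) h.2]

theorem elemsOf_append (ts1 ts2 : List (Sum (List Char) (List Char))) :
    elemsOf (ts1 ++ ts2) = (elemsOf ts1).bind (fun l1 => (elemsOf ts2).map (fun l2 => l1 ++ l2)) := by
  induction ts1 with
  | nil => cases h2 : elemsOf ts2 <;> simp [elemsOf, h2]
  | cons t ts1 ih =>
    cases t with
    | inl l =>
      simp only [List.cons_append, elemsOf, ih]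
      cases elemsOf ts1 <;> cases elemsOf ts2 <;> simp
    | inr v =>
      simp only [List.cons_append, elemsOf, ih]
      cases PySem.Int.ofChars? v <;> try simp
      cases elemsOf ts1 <;> cases elemsOf ts2 <;> simp

-- A's inner while-loop agrees with the token scan on a dot-free segment
theorem aSeg_eq_toks : ∀ (n : Nat) (keys : List Char), keys.length ≤ n → '.' ∉ keys →
    ∀ elems, aSeg keys elems = (elemsOf (toks keys false [])).map (fun es => elems ++ es) := by
  intro n
  induction n with
  | zero =>
    intro keys hl h elems
    have hk : keys = [] := List.eq_nil_of_length_eq_zero (by omega)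
    subst hk
    simp [aSeg, toks, elemsOf]
  | succ n ih =>
    intro keys hl h elems
    by_cases hk : keys = []
    · subst hk; simp [aSeg, toks, elemsOf]
    · rw [aSeg]
      simp only [dif_neg hk]
      have hd2 : '.' ∉ (pvPart '[' keys).2 := fun hm => h (pvPart_mem_snd hm)
      have hd3 : '.' ∉ (pvPart ']' (pvPart '[' keys).2).2 := fun hm => hd2 (pvPart_mem_snd hm)
      have hlen : (pvPart ']' (pvPart '[' keys).2).2.length ≤ n := by
        have h1 := pvPart_snd_lt '[' keys hk
        have h2 := pvPart_snd_le ']' (pvPart '[' keys).2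
        omega
      have hrec := ih (pvPart ']' (pvPart '[' keys).2).2 hlen hd3
      rw [toks_out keys h [], toks_in (pvPart '[' keys).2 hd2 []]
      simp only [List.nil_append]
      by_cases hL : (pvPart '[' keys).1 = []
      · by_cases hV : (pvPart ']' (pvPart '[' keys).2).1 = []
        · simp [hL, hV, elemsOf]
          try rw [hrec]
          try (cases he : elemsOf (toks (pvPart ']' (pvPart '[' keys).2).2 false []) <;>
            simp [he, List.append_assoc])
        · cases hof : PySem.Int.ofChars? (pvPart ']' (pvPart '[' keys).2).1 with
          | none => simp [hL, hV, hof, elemsOf]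
          | some nv =>
            simp [hL, hV, hof, elemsOf]
            try rw [hrec]
            try (cases he : elemsOf (toks (pvPart ']' (pvPart '[' keys).2).2 false []) <;>
              simp [he, List.append_assoc])
      · by_cases hV : (pvPart ']' (pvPart '[' keys).2).1 = []
        · simp [hL, hV, elemsOf]
          try rw [hrec]
          try (cases he : elemsOf (toks (pvPart ']' (pvPart '[' keys).2).2 false []) <;>
            simp [he, List.append_assoc])
        · cases hof : PySem.Int.ofChars? (pvPart ']' (pvPart '[' keys).2).1 with
          | none => simp [hL, hV, hof, elemsOf]
          | some nv =>
            simp [hL, hV, hof, elemsOf]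
            try rw [hrec]
            try (cases he : elemsOf (toks (pvPart ']' (pvPart '[' keys).2).2 false []) <;>
              simp [he, List.append_assoc])

-- A's two loops over all segments agree with the token scan of the whole path
theorem aElems_eq_toks : ∀ (n : Nat) (cs : List Char), cs.length ≤ n →
    ∀ elems, aElems (mySplit '.' cs) elems
      = (elemsOf (toks cs false [])).map (fun es => elems ++ es) := by
  intro n
  induction n with
  | zero =>
    intro cs hl elems
    have hc : cs = [] := List.eq_nil_of_length_eq_zero (by omega)
    subst hc
    rw [mySplit_eq]
    simp [pvPart, aElems, aSeg, toks, elemsOf]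
  | succ n ih =>
    intro cs hl elems
    by_cases hm : '.' ∈ cs
    · have hne : cs ≠ [] := by rintro rfl; simp at hm
      have hnp1 : '.' ∉ (pvPart '.' cs).1 := pvPart_fst_not_mem '.' cs
      rw [mySplit_eq]
      simp only [if_pos hm, aElems]
      rw [aSeg_eq_toks ((pvPart '.' cs).1.length) (pvPart '.' cs).1 le_rfl hnp1 elems]
      conv_rhs => rw [pvPart_decomp hm]
      rw [toks_dot _ _ _ _ hnp1, elemsOf_append]
      cases h1 : elemsOf (toks (pvPart '.' cs).1 false []) with
      | none => simp [h1]
      | some l1 =>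
        simp only [h1, Option.map_some]
        rw [ih (pvPart '.' cs).2 (by have := pvPart_snd_lt '.' cs hne; omega) (elems ++ l1)]
        cases h2 : elemsOf (toks (pvPart '.' cs).2 false []) <;> simp [h2, List.append_assoc]
    · rw [mySplit_eq]
      simp only [if_neg hm, pvPart_not_mem hm, aElems]
      rw [aSeg_eq_toks cs.length cs le_rfl hm elems]
      cases he : elemsOf (toks cs false []) <;> simp [he]

-- formatting A's elements list = formatting the tokens directly
theorem appT_of_elemsOf (ts : List (Sum (List Char) (List Char))) :
    ∀ (es : List (Sum (List Char) Int)), elemsOf ts = some es →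
      ∀ (res : List Char), appT ts res = some (es.foldl aFmt res) := by
  induction ts with
  | nil =>
    intro es hes res
    simp only [elemsOf, Option.some_inj] at hes
    subst hes
    simp [appT]
  | cons t ts ih =>
    intro es hes res
    cases t with
    | inl l =>
      simp only [elemsOf] at hes
      cases h1 : elemsOf ts with
      | none => rw [h1] at hes; simp at hes
      | some es' =>
        rw [h1] at hes
        simp only [Option.map_some, Option.some_inj] at hes
        subst hes
        simp only [appT]
        rw [ih es' h1 (bObj res l)]
        simp [aFmt, bObj, List.append_assoc]
    | inr v =>
      simp only [elemsOf] at hes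
      cases hof : PySem.Int.ofChars? v with
      | none => rw [hof] at hes; simp at hes
      | some nv =>
        rw [hof] at hes
        cases h1 : elemsOf ts with
        | none => rw [h1] at hes; simp at hes
        | some es' =>
          rw [h1] at hes
          simp only [Option.map_some, Option.some_inj] at hes
          subst hes
          simp only [appT, hof]
          rw [ih es' h1 (bArr res nv)]
          simp [aFmt, bArr]

-- B's scan is the token scan followed by the formatting fold
theorem bGo_eq_appT (cs : List Char) : ∀ (inside : Bool) (buf res : List Char),
    bGo cs inside buf res = appT (toks cs inside buf) res := by
  induction cs with
  | nil =>
    intro inside buf res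
    cases inside with
    | true =>
      by_cases hb : buf = []
      · simp [bGo, toks, appT, bFlushIn, hb]
      · cases hof : PySem.Int.ofChars? buf <;>
          simp [bGo, toks, appT, bFlushIn, hb, hof]
    | false =>
      by_cases hb : buf = [] <;> simp [bGo, toks, appT, bFlushOut, hb]
  | cons c rest ih =>
    intro inside buf res
    cases inside with
    | true =>
      by_cases hcond : c = ']' ∨ c = '.'
      · by_cases hb : buf = []
        · simp [bGo, toks, appT, bFlushIn, hcond, hb, ih]
        · cases hof : PySem.Int.ofChars? buf <;>
            simp [bGo, toks, appT, bFlushIn, hcond, hb, hof, ih]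
      · simp [bGo, toks, hcond, ih]
    | false =>
      by_cases hcond : c = '[' ∨ c = '.'
      · by_cases hb : buf = [] <;> simp [bGo, toks, appT, bFlushOut, hcond, hb, ih]
      · simp [bGo, toks, hcond, ih]

-- pvVals extracts exactly the bracket tokens of the scan
theorem toks_filterMap_out_buf (cs : List Char) : ∀ (buf buf' : List Char),
    (toks cs false buf).filterMap Sum.getRight? = (toks cs false buf').filterMap Sum.getRight? := by
  induction cs with
  | nil =>
    intro buf buf'
    by_cases hb : buf = [] <;> by_cases hb' : buf' = [] <;>
      simp [toks, hb, hb', Sum.getRight?]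
  | cons c rest ih =>
    intro buf buf'
    by_cases hcond : c = '[' ∨ c = '.'
    · by_cases hb : buf = [] <;> by_cases hb' : buf' = [] <;>
        simp [toks, hcond, hb, hb', Sum.getRight?]
    · simp [toks, hcond]
      exact ih (buf ++ [c]) (buf' ++ [c])

theorem pvVals_eq_toks (cs : List Char) : ∀ (inside : Bool) (buf : List Char),
    pvVals cs inside buf = (toks cs inside buf).filterMap Sum.getRight? := by
  induction cs with
  | nil =>
    intro inside buf
    cases inside <;> by_cases hb : buf = [] <;>
      simp [pvVals, toks, hb, Sum.getRight?]
  | cons c rest ih =>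
    intro inside buf
    cases inside with
    | true =>
      by_cases hcond : c = ']' ∨ c = '.'
      · by_cases hb : buf = [] <;> simp [pvVals, toks, hcond, hb, ih, Sum.getRight?]
      · simp [pvVals, toks, hcond, ih]
    | false =>
      by_cases hcond : c = '[' ∨ c = '.'
      · by_cases hb : buf = [] <;> simp [pvVals, toks, hcond, hb, ih, Sum.getRight?]
      · have hc : ¬ c = '[' := fun h1 => hcond (Or.inl h1)
        have hcd : ¬ c = '.' := fun h1 => hcond (Or.inr h1)
        simp [pvVals, toks, hcond, hc, hcd]
        rw [ih false []]
        exact toks_filterMap_out_buf rest [] (buf ++ [c])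

theorem elemsOf_isSome (ts : List (Sum (List Char) (List Char)))
    (h : ∀ v ∈ ts.filterMap Sum.getRight?, (PySem.Int.ofChars? v).isSome = true) :
    (elemsOf ts).isSome = true := by
  induction ts with
  | nil => simp [elemsOf]
  | cons t ts ih =>
    cases t with
    | inl l =>
      have hfl : List.filterMap Sum.getRight? (Sum.inl l :: ts)
          = List.filterMap Sum.getRight? ts := by
        rw [List.filterMap_cons]
        simp [Sum.getRight?]
      rw [hfl] at h
      have hts := ih h
      cases he : elemsOf ts with
      | none => rw [he] at hts; simp at hts
      | some es => simp [elemsOf, he]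
    | inr v =>
      have hfl : List.filterMap Sum.getRight? (Sum.inr v :: ts)
          = v :: List.filterMap Sum.getRight? ts := by
        rw [List.filterMap_cons]
        simp [Sum.getRight?]
      rw [hfl] at h
      have hv := h v (List.mem_cons_self ..)
      obtain ⟨nv, hn⟩ := Option.isSome_iff_exists.mp hv
      have hts := ih (fun w hw => h w (List.mem_cons_of_mem _ hw))
      cases he : elemsOf ts with
      | none => rw [he] at hts; simp at hts
      | some es => simp [elemsOf, he, hn]

-- ===== VERDICT (by name: the statement is the Claim_ definition above) =====
theorem parse_json_path_all_spec : Claim_equal_parse_json_path_all := by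
  intro path result _hdom hpre
  unfold Spec_parse_json_path_all parse_json_path_all parse_json_path_all_alt
  unfold Pre_parse_json_path_all at hpre
  rw [pvVals_eq_toks] at hpre
  have hsome := elemsOf_isSome (toks path.toList false []) hpre
  obtain ⟨es, hes⟩ := Option.isSome_iff_exists.mp hsome
  rw [splitOn_eq_mySplit, aElems_eq_toks path.toList.length path.toList le_rfl []]
  rw [bGo_eq_appT, appT_of_elemsOf _ es hes, hes]
  simp only [Option.map_some, List.nil_append]
  by_cases hese : es = []
  · subst hese
    simp
  · simp [hese]
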